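-- pv_equiv track=rewrite | github.com/kr-sang/Algorithm-solution | day4/graph31464.py | tree_check
-- ===== SOURCE A (Python) =====
-- dirs = [(-1,0), (1,0), (0,-1), (0,1)]
--
-- def in_bound(x,y,N):
--     if 0<=x<N and 0<=y<N:
--         return True
--     else:
--         return False
--
-- def tree_check(world, N):
--     nodes = []
--     for i in range(N):
--         for j in range(N):
--             if world[i][j] == "#":
--                 nodes.append((i,j))
--     node_count = len(nodes)
--     edge_set = set()
--     for i,j in nodes:
--         for di,dj in dirs:
--             ni,nj = i + di, j + dj
--             if in_bound(ni,nj,N) and world[ni][nj] == "#":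
--                 a,b = (i,j), (ni,nj)
--                 if a>b:
--                     a,b = b,a
--                 edge_set.add((a,b))
--     edge_count = len(edge_set)
--     if edge_count != node_count - 1:
--         return False
--     visited = set()
--     def dfs(i,j):
--         visited.add((i,j))
--         for di, dj in dirs:
--             ni,nj = i + di, j + dj
--             if in_bound(ni,nj,N) and world[ni][nj] == "#" and (ni,nj) not in visited:
--                 dfs(ni,nj)
--     dfs(nodes[0][0], nodes[0][1])
--     return len(visited) == node_count
-- ===== SOURCE B (Python) =====
-- def tree_check(world, N):
--     nodes = [(i, j) for i in range(N) for j in range(N) if world[i][j] == "#"]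
--     edges = []
--     for (i, j) in nodes:
--         for (ni, nj) in ((i, j + 1), (i + 1, j)):
--             if 0 <= ni < N and 0 <= nj < N and world[ni][nj] == "#":
--                 edges.append(((i, j), (ni, nj)))
--     comps = [[p] for p in nodes]
--     for (a, b) in edges:
--         ca = next(c for c in comps if a in c)
--         cb = next(c for c in comps if b in c)
--         if ca != cb:
--             comps.remove(ca)
--             comps.remove(cb)
--             comps.append(ca + cb)
--     return len(comps) == 1 and len(edges) == len(nodes) - 1
-- ===== Notes on version B (the rewrite author's own statement) =====
-- stated objective: alternative
-- what changed: A deduplicates undirected edges through a set built from all four directions and tests connectivity by recursive DFS plus an edge-count comparison; B enumerates each undirected edge exactly once (right/down neighbours only, no set), and decides tree-ness by merging disjoint-set components over the edge list, returning True iff one component remains and the edge count is n-1.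
import Mathlib
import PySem

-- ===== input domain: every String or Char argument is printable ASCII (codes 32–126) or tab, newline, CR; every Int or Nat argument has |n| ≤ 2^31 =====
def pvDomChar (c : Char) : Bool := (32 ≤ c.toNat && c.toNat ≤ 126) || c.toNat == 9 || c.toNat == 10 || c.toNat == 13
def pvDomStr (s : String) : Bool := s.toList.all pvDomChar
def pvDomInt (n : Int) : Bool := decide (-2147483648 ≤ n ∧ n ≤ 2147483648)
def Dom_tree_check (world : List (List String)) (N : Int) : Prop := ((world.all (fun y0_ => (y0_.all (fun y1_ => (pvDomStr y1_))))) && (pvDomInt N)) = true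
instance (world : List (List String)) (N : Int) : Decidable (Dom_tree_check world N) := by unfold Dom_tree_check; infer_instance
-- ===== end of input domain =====

-- B replaces A's four-direction edge-set dedup + recursive DFS connectivity test by a
-- right/down edge enumeration and disjoint-set component merging (alternative algorithm,
-- same return value).

-- ===== PORT A =====
def pvDirs : List (Int × Int) := [(-1,0),(1,0),(0,-1),(0,1)]

def in_bound (x y N : Int) : Bool := if 0 ≤ x ∧ x < N ∧ 0 ≤ y ∧ y < N then true else false

-- world[i][j], as an Option (none = IndexError, excluded by Pre_)
def pvCellA (world : List (List String)) (i j : Int) : Option String :=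
  (PySem.List.pyGet? world i).bind (fun row => PySem.List.pyGet? row j)

def pvNodesA (world : List (List String)) (N : Int) : List (Int × Int) :=
  (PySem.List.pyRange 0 N 1).foldl (fun acc i =>
    (PySem.List.pyRange 0 N 1).foldl (fun acc j =>
      if pvCellA world i j == some "#" then acc ++ [(i, j)] else acc) acc) []

-- Python tuple comparison a > b on pairs of ints (lexicographic)
def pvTupGt (a b : Int × Int) : Bool := a.1 > b.1 || (a.1 == b.1 && a.2 > b.2)

def pvEdgeSetA (world : List (List String)) (N : Int) (nodes : List (Int × Int)) :
    PySem.Set ((Int × Int) × (Int × Int)) :=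
  nodes.foldl (fun es p =>
    pvDirs.foldl (fun es d =>
      let q := (p.1 + d.1, p.2 + d.2)
      if in_bound q.1 q.2 N && (pvCellA world q.1 q.2 == some "#") then
        PySem.Set.add es (if pvTupGt p q then (q, p) else (p, q))
      else es) es) PySem.Set.empty

def pvDfsA (world : List (List String)) (N : Int) :
    Nat → PySem.Set (Int × Int) → Int × Int → PySem.Set (Int × Int)
  | 0, vis, _ => vis
  | fuel+1, vis, p =>
    pvDirs.foldl (fun vis d =>
      let q := (p.1 + d.1, p.2 + d.2)
      if in_bound q.1 q.2 N && (pvCellA world q.1 q.2 == some "#") &&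
         !(PySem.Set.contains vis q) then
        pvDfsA world N fuel vis q
      else vis) (PySem.Set.add vis p)

def tree_check (world : List (List String)) (N : Int) : Bool :=
  let nodes := pvNodesA world N
  let node_count : Int := nodes.length
  let edge_count : Int := (pvEdgeSetA world N nodes).length
  if edge_count ≠ node_count - 1 then false
  else
    match PySem.List.pyGet? nodes 0 with
    | none => false   -- unreachable: here edge_count = node_count - 1 ≥ 0 forces nodes ≠ []
    | some p0 => ((pvDfsA world N (nodes.length + 1) PySem.Set.empty p0).length : Int) == node_count

-- ===== PORT B =====
def pvCellB (world : List (List String)) (i j : Int) : Option String :=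
  (PySem.List.pyGet? world i).bind (fun row => PySem.List.pyGet? row j)

def pvNodesB (world : List (List String)) (N : Int) : List (Int × Int) :=
  (PySem.List.pyRange 0 N 1).flatMap (fun i =>
    (PySem.List.pyRange 0 N 1).filterMap (fun j =>
      if pvCellB world i j == some "#" then some (i, j) else none))

def pvEdgesB (world : List (List String)) (N : Int) (nodes : List (Int × Int)) :
    List ((Int × Int) × (Int × Int)) :=
  nodes.foldl (fun es p =>
    [(p.1, p.2 + 1), (p.1 + 1, p.2)].foldl (fun es q =>
      if (0 ≤ q.1 && q.1 < N) && (0 ≤ q.2 && q.2 < N) &&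
         (pvCellB world q.1 q.2 == some "#") then
        es ++ [(p, q)]
      else es) es) []

def pvMerge (comps : List (List (Int × Int))) (e : (Int × Int) × (Int × Int)) :
    List (List (Int × Int)) :=
  match comps.find? (fun c => decide (e.1 ∈ c)), comps.find? (fun c => decide (e.2 ∈ c)) with
  | some ca, some cb => if ca = cb then comps else ((comps.erase ca).erase cb) ++ [ca ++ cb]
  | _, _ => comps    -- unreachable: every edge endpoint lies in some component

def tree_check_alt (world : List (List String)) (N : Int) : Bool :=
  let nodes := pvNodesB world N
  let edges := pvEdgesB world N nodes
  let comps := edges.foldl pvMerge (nodes.map (fun p => [p]))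
  (comps.length == 1) && ((edges.length : Int) == (nodes.length : Int) - 1)

-- ===== PRECONDITION & SPEC =====
-- Pre_ excludes exactly the inputs on which Python A raises IndexError: a positive N that
-- exceeds the number of rows, or one of the first N rows shorter than N.
def Pre_tree_check (world : List (List String)) (N : Int) : Prop :=
  0 < N → (N ≤ (world.length : Int) ∧ ∀ row ∈ world.take N.toNat, N ≤ (row.length : Int))
instance (world : List (List String)) (N : Int) : Decidable (Pre_tree_check world N) := by
  unfold Pre_tree_check; infer_instance

def pvWitness_tree_check : List (List String) × Int := ([[ "#", "#"], ["#", "."]], 2)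

def Spec_tree_check (world : List (List String)) (N : Int) (out : Bool) : Prop := out = tree_check_alt world N
instance (world : List (List String)) (N : Int) (out : Bool) : Decidable (Spec_tree_check world N out) := by unfold Spec_tree_check; infer_instance

-- ===== CLAIM (what is proved, stated in full; the proofs are below) =====
def Claim_equal_tree_check : Prop := ∀ (world : List (List String)) (N : Int), Dom_tree_check world N → Pre_tree_check world N → Spec_tree_check world N (tree_check world N)

-- ===== LEMMAS AND PROOFS =====

theorem pvCellB_eq : pvCellB = pvCellA := rfl

-- p is a '#' grid cell of world within [0,N) × [0,N)
def pvIsNode (world : List (List String)) (N : Int) (p : Int × Int) : Prop :=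
  0 ≤ p.1 ∧ p.1 < N ∧ 0 ≤ p.2 ∧ p.2 < N ∧ pvCellA world p.1 p.2 = some "#"

-- the undirected edges, each named once: (p, its right or down '#' neighbour)
def pvIsEdge (world : List (List String)) (N : Int) (e : (Int × Int) × (Int × Int)) : Prop :=
  pvIsNode world N e.1 ∧ pvIsNode world N e.2 ∧
    (e.2 = (e.1.1, e.1.2 + 1) ∨ e.2 = (e.1.1 + 1, e.1.2))

theorem nodesA_eq_flatMap (world : List (List String)) (N : Int) :
    pvNodesA world N = (PySem.List.pyRange 0 N 1).flatMap (fun i =>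
      ((PySem.List.pyRange 0 N 1).filter (fun j => pvCellA world i j == some "#")).map
        (fun j => (i, j))) := by
  unfold pvNodesA
  have h1 : (fun (acc : List (Int × Int)) (i : Int) =>
      (PySem.List.pyRange 0 N 1).foldl (fun acc j =>
        if pvCellA world i j == some "#" then acc ++ [(i, j)] else acc) acc) =
      (fun acc i => acc ++ (((PySem.List.pyRange 0 N 1).filter
        (fun j => pvCellA world i j == some "#")).map (fun j => (i, j)))) := by
    funext acc i
    exact PySem.List.foldl_append_if _ _ _ _
  rw [h1, PySem.List.foldl_append_eq_flatMap]
  rfl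

theorem mem_nodesA (world : List (List String)) (N : Int) (p : Int × Int) :
    p ∈ pvNodesA world N ↔ pvIsNode world N p := by
  rcases p with ⟨x, y⟩
  simp only [nodesA_eq_flatMap, List.mem_flatMap, List.mem_map, List.mem_filter,
    PySem.List.mem_pyRange_one, pvIsNode, beq_iff_eq, Prod.mk.injEq]
  constructor
  · rintro ⟨i, hi, j, ⟨hj, hc⟩, hx, hy⟩
    subst hx; subst hy; exact ⟨hi.1, hi.2, hj.1, hj.2, hc⟩
  · rintro ⟨h1, h2, h3, h4, h5⟩
    exact ⟨x, ⟨h1, h2⟩, y, ⟨⟨h3, h4⟩, h5⟩, rfl, rfl⟩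

theorem nodup_nodesA (world : List (List String)) (N : Int) : (pvNodesA world N).Nodup := by
  rw [nodesA_eq_flatMap, List.flatMap_def, List.nodup_flatten]
  constructor
  · intro l hl
    simp only [List.mem_map] at hl
    rcases hl with ⟨i, _, rfl⟩
    refine List.Nodup.map ?_ (List.Nodup.filter _ (PySem.List.nodup_pyRange_one 0 N))
    intro a b h
    simpa using congrArg Prod.snd h
  · rw [List.pairwise_map]
    refine List.Pairwise.imp_of_mem ?_ (PySem.List.nodup_pyRange_one 0 N)
    intro a b _ _ hab x hx hx'
    simp only [List.mem_map, List.mem_filter] at hx hx'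
    rcases hx with ⟨j, _, hj⟩
    rcases hx' with ⟨j', _, hj'⟩
    rw [← hj] at hj'
    exact hab (congrArg Prod.fst hj').symm

theorem nodesB_eq_nodesA (world : List (List String)) (N : Int) :
    pvNodesB world N = pvNodesA world N := by
  rw [nodesA_eq_flatMap]
  unfold pvNodesB
  congr 1
  funext i
  rw [pvCellB_eq]
  generalize PySem.List.pyRange 0 N 1 = l
  induction l with
  | nil => rfl
  | cons x t ih =>
    simp only [List.filterMap_cons, List.filter_cons]
    by_cases h : (pvCellA world i x == some "#") = true
    · rw [if_pos h, if_pos h]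
      simpa using ih
    · rw [if_neg h, if_neg h]
      simpa using ih

theorem pvCondB_iff (world : List (List String)) (N : Int) (q : Int × Int) :
    ((0 ≤ q.1 && q.1 < N) && (0 ≤ q.2 && q.2 < N) &&
      (pvCellB world q.1 q.2 == some "#")) = true ↔ pvIsNode world N q := by
  simp [pvIsNode, pvCellB_eq, and_assoc]

theorem pvCondA_iff (world : List (List String)) (N : Int) (x y : Int) :
    (in_bound x y N && (pvCellA world x y == some "#")) = true ↔ pvIsNode world N (x, y) := by
  simp only [in_bound, pvIsNode, Bool.and_eq_true, beq_iff_eq]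
  constructor
  · rintro ⟨h1, h2⟩
    split_ifs at h1 with h
    · exact ⟨h.1, h.2.1, h.2.2.1, h.2.2.2, h2⟩
  · rintro ⟨h1, h2, h3, h4, h5⟩
    exact ⟨by rw [if_pos ⟨h1, h2, h3, h4⟩], h5⟩

theorem edgesB_eq_flatMap (world : List (List String)) (N : Int) (ns : List (Int × Int)) :
    pvEdgesB world N ns = ns.flatMap (fun p =>
      (([(p.1, p.2 + 1), (p.1 + 1, p.2)]).filter (fun q =>
        (0 ≤ q.1 && q.1 < N) && (0 ≤ q.2 && q.2 < N) &&
          (pvCellB world q.1 q.2 == some "#"))).map (fun q => (p, q))) := by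
  unfold pvEdgesB
  have h1 : (fun (es : List ((Int × Int) × (Int × Int))) (p : Int × Int) =>
      [(p.1, p.2 + 1), (p.1 + 1, p.2)].foldl (fun es q =>
        if (0 ≤ q.1 && q.1 < N) && (0 ≤ q.2 && q.2 < N) &&
            (pvCellB world q.1 q.2 == some "#") then es ++ [(p, q)] else es) es) =
      (fun es p => es ++ (([(p.1, p.2 + 1), (p.1 + 1, p.2)]).filter (fun q =>
        (0 ≤ q.1 && q.1 < N) && (0 ≤ q.2 && q.2 < N) &&
          (pvCellB world q.1 q.2 == some "#"))).map (fun q => (p, q))) := by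
    funext es p
    exact PySem.List.foldl_append_if _ _ _ _
  rw [h1, PySem.List.foldl_append_eq_flatMap]
  rfl

theorem mem_edgesB (world : List (List String)) (N : Int) (e : (Int × Int) × (Int × Int)) :
    e ∈ pvEdgesB world N (pvNodesA world N) ↔ pvIsEdge world N e := by
  rw [edgesB_eq_flatMap]
  simp only [List.mem_flatMap, List.mem_map, List.mem_filter]
  constructor
  · rintro ⟨p, hp, q, ⟨hq2, hcond⟩, rfl⟩
    have hqn := (pvCondB_iff world N q).mp hcond
    have hpn := (mem_nodesA world N p).mp hp
    rcases List.mem_pair.mp hq2 with rfl | rfl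
    · exact ⟨hpn, hqn, Or.inl rfl⟩
    · exact ⟨hpn, hqn, Or.inr rfl⟩
  · rintro ⟨h1, h2, h3 | h3⟩
    · refine ⟨e.1, (mem_nodesA world N e.1).mpr h1, e.2, ⟨?_, (pvCondB_iff world N e.2).mpr h2⟩, rfl⟩
      rw [h3]; simp
    · refine ⟨e.1, (mem_nodesA world N e.1).mpr h1, e.2, ⟨?_, (pvCondB_iff world N e.2).mpr h2⟩, rfl⟩
      rw [h3]; simp


theorem nodup_edgesB (world : List (List String)) (N : Int) :
    (pvEdgesB world N (pvNodesA world N)).Nodup := by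
  rw [edgesB_eq_flatMap, List.flatMap_def, List.nodup_flatten]
  constructor
  · intro l hl
    simp only [List.mem_map] at hl
    rcases hl with ⟨p, _, rfl⟩
    refine List.Nodup.map ?_ (List.Nodup.filter _ ?_)
    · intro a b h
      simpa using congrArg Prod.snd h
    · simp only [List.nodup_cons, List.mem_cons, List.not_mem_nil, or_false, List.nodup_nil, and_true]
      refine ⟨fun h => ?_, by simp⟩
      rw [Prod.mk.injEq] at h
      omega
  · rw [List.pairwise_map]
    refine List.Pairwise.imp_of_mem ?_ (nodup_nodesA world N)
    intro a b _ _ hab x hx hx'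
    simp only [List.mem_map, List.mem_filter] at hx hx'
    rcases hx with ⟨j, _, hj⟩
    rcases hx' with ⟨j', _, hj'⟩
    rw [← hj] at hj'
    exact hab (congrArg Prod.fst hj').symm

theorem mem_setfold_inner (world : List (List String)) (N : Int) (p : Int × Int)
    (x : (Int × Int) × (Int × Int)) : ∀ (ds : List (Int × Int))
    (es : PySem.Set ((Int × Int) × (Int × Int))),
    x ∈ ds.foldl (fun es d =>
      let q := (p.1 + d.1, p.2 + d.2)
      if in_bound q.1 q.2 N && (pvCellA world q.1 q.2 == some "#") then
        PySem.Set.add es (if pvTupGt p q then (q, p) else (p, q))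
      else es) es ↔
    x ∈ es ∨ ∃ d ∈ ds, pvIsNode world N (p.1 + d.1, p.2 + d.2) ∧
      x = (if pvTupGt p (p.1 + d.1, p.2 + d.2) then ((p.1 + d.1, p.2 + d.2), p)
           else (p, (p.1 + d.1, p.2 + d.2))) := by
  intro ds
  induction ds with
  | nil => simp
  | cons d t ih =>
    intro es
    rw [List.foldl_cons]
    by_cases h : (in_bound (p.1 + d.1) (p.2 + d.2) N &&
        (pvCellA world (p.1 + d.1) (p.2 + d.2) == some "#")) = true
    · simp only [h, if_pos, ih, PySem.Set.mem_add]
      have hn := (pvCondA_iff world N (p.1 + d.1) (p.2 + d.2)).mp h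
      simp only [List.mem_cons]
      constructor
      · rintro ((hx | hx) | ⟨d', hd', hx⟩)
        · exact Or.inl hx
        · exact Or.inr ⟨d, Or.inl rfl, hn, hx⟩
        · exact Or.inr ⟨d', Or.inr hd', hx⟩
      · rintro (hx | ⟨d', (rfl | hd'), hx⟩)
        · exact Or.inl (Or.inl hx)
        · exact Or.inl (Or.inr hx.2)
        · exact Or.inr ⟨d', hd', hx⟩
    · simp only [h]
      rw [if_neg (by simpa using h), ih]
      have hn : ¬ pvIsNode world N (p.1 + d.1, p.2 + d.2) := fun hc =>
        h ((pvCondA_iff world N (p.1 + d.1) (p.2 + d.2)).mpr hc)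
      simp only [List.mem_cons]
      constructor
      · rintro (hx | ⟨d', hd', hx⟩)
        · exact Or.inl hx
        · exact Or.inr ⟨d', Or.inr hd', hx⟩
      · rintro (hx | ⟨d', (rfl | hd'), hx⟩)
        · exact Or.inl hx
        · exact absurd hx.1 hn
        · exact Or.inr ⟨d', hd', hx⟩

theorem mem_setfold_outer (world : List (List String)) (N : Int)
    (x : (Int × Int) × (Int × Int)) : ∀ (ns : List (Int × Int))
    (es : PySem.Set ((Int × Int) × (Int × Int))),
    x ∈ ns.foldl (fun es p =>
      pvDirs.foldl (fun es d =>
        let q := (p.1 + d.1, p.2 + d.2)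
        if in_bound q.1 q.2 N && (pvCellA world q.1 q.2 == some "#") then
          PySem.Set.add es (if pvTupGt p q then (q, p) else (p, q))
        else es) es) es ↔
    x ∈ es ∨ ∃ p ∈ ns, ∃ d ∈ pvDirs, pvIsNode world N (p.1 + d.1, p.2 + d.2) ∧
      x = (if pvTupGt p (p.1 + d.1, p.2 + d.2) then ((p.1 + d.1, p.2 + d.2), p)
           else (p, (p.1 + d.1, p.2 + d.2))) := by
  intro ns
  induction ns with
  | nil => simp
  | cons a t ih =>
    intro es
    rw [List.foldl_cons, ih, mem_setfold_inner]
    simp only [List.mem_cons]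
    constructor
    · rintro ((hx | ⟨d, hd, hx⟩) | ⟨p, hp, hd⟩)
      · exact Or.inl hx
      · exact Or.inr ⟨a, Or.inl rfl, d, hd, hx⟩
      · exact Or.inr ⟨p, Or.inr hp, hd⟩
    · rintro (hx | ⟨p, (rfl | hp), hd⟩)
      · exact Or.inl (Or.inl hx)
      · exact Or.inl (Or.inr hd)
      · exact Or.inr ⟨p, hp, hd⟩

theorem pvPairEq {a b c d : Int} (h1 : a = c) (h2 : b = d) : ((a, b) : Int × Int) = (c, d) := by
  rw [h1, h2]

theorem pvOrdered_iff (world : List (List String)) (N : Int) (e : (Int × Int) × (Int × Int)) :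
    (∃ p, pvIsNode world N p ∧ ∃ d ∈ pvDirs, pvIsNode world N (p.1 + d.1, p.2 + d.2) ∧
      e = (if pvTupGt p (p.1 + d.1, p.2 + d.2) then ((p.1 + d.1, p.2 + d.2), p)
           else (p, (p.1 + d.1, p.2 + d.2)))) ↔ pvIsEdge world N e := by
  constructor
  · rintro ⟨⟨p1, p2⟩, hp, d, hd, hq, rfl⟩
    simp only [pvDirs, List.mem_cons, List.not_mem_nil, or_false] at hd
    rcases hd with rfl | rfl | rfl | rfl
    · rw [if_pos (by simp [pvTupGt] <;> omega)]
      exact ⟨hq, hp, Or.inr (pvPairEq (show p1 = p1 + -1 + 1 by omega) (show p2 = p2 + 0 by omega))⟩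
    · rw [if_neg (by simp [pvTupGt] <;> omega)]
      exact ⟨hp, hq, Or.inr (pvPairEq (show p1 + 1 = p1 + 1 by omega) (show p2 + 0 = p2 by omega))⟩
    · rw [if_pos (by simp [pvTupGt] <;> omega)]
      exact ⟨hq, hp, Or.inl (pvPairEq (show p1 = p1 + 0 by omega) (show p2 = p2 + -1 + 1 by omega))⟩
    · rw [if_neg (by simp [pvTupGt] <;> omega)]
      exact ⟨hp, hq, Or.inl (pvPairEq (show p1 + 0 = p1 by omega) (show p2 + 1 = p2 + 1 by omega))⟩
  · rintro ⟨h1, h2, h3 | h3⟩ <;> obtain ⟨⟨a1, a2⟩, b⟩ := e <;> simp only at h1 h2 h3 <;> subst h3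
    · refine ⟨(a1, a2), h1, (0, 1), by simp [pvDirs], by simpa using h2, ?_⟩
      rw [if_neg (by simp [pvTupGt] <;> omega)]
      refine congrArg (Prod.mk (a1, a2)) ?_
      exact pvPairEq (show a1 = (a1, a2).1 + ((0 : Int), (1 : Int)).1 by simp)
        (show a2 + 1 = (a1, a2).2 + ((0 : Int), (1 : Int)).2 by simp)
    · refine ⟨(a1, a2), h1, (1, 0), by simp [pvDirs], by simpa using h2, ?_⟩
      rw [if_neg (by simp [pvTupGt] <;> omega)]
      refine congrArg (Prod.mk (a1, a2)) ?_
      exact pvPairEq (show a1 + 1 = (a1, a2).1 + ((1 : Int), (0 : Int)).1 by simp)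
        (show a2 = (a1, a2).2 + ((1 : Int), (0 : Int)).2 by simp)

theorem mem_edgeSetA (world : List (List String)) (N : Int) (e : (Int × Int) × (Int × Int)) :
    e ∈ pvEdgeSetA world N (pvNodesA world N) ↔ pvIsEdge world N e := by
  unfold pvEdgeSetA
  rw [mem_setfold_outer]
  rw [← pvOrdered_iff world N e]
  simp only [PySem.Set.empty, List.not_mem_nil, false_or]
  constructor
  · rintro ⟨p, hp, rest⟩
    exact ⟨p, (mem_nodesA world N p).mp hp, rest⟩
  · rintro ⟨p, hp, rest⟩
    exact ⟨p, (mem_nodesA world N p).mpr hp, rest⟩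

theorem nodup_setfold_inner (world : List (List String)) (N : Int) (p : Int × Int) :
    ∀ (ds : List (Int × Int)) (es : PySem.Set ((Int × Int) × (Int × Int))), es.Nodup →
    (ds.foldl (fun es d =>
      let q := (p.1 + d.1, p.2 + d.2)
      if in_bound q.1 q.2 N && (pvCellA world q.1 q.2 == some "#") then
        PySem.Set.add es (if pvTupGt p q then (q, p) else (p, q))
      else es) es).Nodup := by
  intro ds
  induction ds with
  | nil => intro es h; exact h
  | cons d t ih =>
    intro es h
    rw [List.foldl_cons]
    dsimp only
    split
    · exact ih _ (PySem.Set.nodup_add _ _ h)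
    · exact ih _ h

theorem nodup_edgeSetA (world : List (List String)) (N : Int) :
    (pvEdgeSetA world N (pvNodesA world N)).Nodup := by
  unfold pvEdgeSetA
  generalize pvNodesA world N = ns
  have : ∀ (ns : List (Int × Int)) (es : PySem.Set ((Int × Int) × (Int × Int))), es.Nodup →
      (ns.foldl (fun es p =>
        pvDirs.foldl (fun es d =>
          let q := (p.1 + d.1, p.2 + d.2)
          if in_bound q.1 q.2 N && (pvCellA world q.1 q.2 == some "#") then
            PySem.Set.add es (if pvTupGt p q then (q, p) else (p, q))
          else es) es) es).Nodup := by
    intro ns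
    induction ns with
    | nil => intro es h; exact h
    | cons a t ih =>
      intro es h
      rw [List.foldl_cons]
      exact ih _ (nodup_setfold_inner world N a pvDirs es h)
  exact this ns PySem.Set.empty List.nodup_nil


theorem length_edgeSetA (world : List (List String)) (N : Int) :
    (pvEdgeSetA world N (pvNodesA world N)).length = (pvEdgesB world N (pvNodesA world N)).length := by
  exact ((List.perm_ext_iff_of_nodup (nodup_edgeSetA world N) (nodup_edgesB world N)).mpr
    (fun e => (mem_edgeSetA world N e).trans (mem_edgesB world N e).symm)).length_eq

theorem pvDfsCond_iff (world : List (List String)) (N : Int) (vis : PySem.Set (Int × Int))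
    (x y : Int) :
    (in_bound x y N && (pvCellA world x y == some "#") && !(PySem.Set.contains vis (x, y))) = true ↔
    pvIsNode world N (x, y) ∧ (x, y) ∉ vis := by
  rw [Bool.and_eq_true, Bool.not_eq_true', pvCondA_iff]
  constructor
  · rintro ⟨h1, h2⟩
    refine ⟨h1, fun hc => ?_⟩
    rw [(PySem.Set.contains_iff _ _).mpr hc] at h2
    cases h2
  · rintro ⟨h1, h2⟩
    refine ⟨h1, ?_⟩
    cases hcb : PySem.Set.contains vis (x, y)
    · rfl
    · exact absurd ((PySem.Set.contains_iff _ _).mp hcb) h2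

theorem pvCardMono (HF : Finset (Int × Int)) (u u' : List (Int × Int))
    (h : ∀ x ∈ u, x ∈ u') : (HF \ u'.toFinset).card ≤ (HF \ u.toFinset).card := by
  apply Finset.card_le_card
  apply Finset.sdiff_subset_sdiff (Finset.Subset.refl _)
  intro x hx
  simp only [List.mem_toFinset] at *
  exact h x hx

theorem dfs_supset (world : List (List String)) (N : Int) :
    ∀ (fuel : Nat) (vis : PySem.Set (Int × Int)) (p : Int × Int),
      ∀ x ∈ vis, x ∈ pvDfsA world N fuel vis p := by
  intro fuel
  induction fuel with
  | zero => intro vis p x hx; exact hx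
  | succ fuel ih =>
    intro vis p x hx
    show x ∈ pvDirs.foldl _ (PySem.Set.add vis p)
    have aux : ∀ (ds : List (Int × Int)) (u : PySem.Set (Int × Int)), x ∈ u →
        x ∈ ds.foldl (fun vis d =>
          let q := (p.1 + d.1, p.2 + d.2)
          if in_bound q.1 q.2 N && (pvCellA world q.1 q.2 == some "#") &&
             !(PySem.Set.contains vis q) then
            pvDfsA world N fuel vis q
          else vis) u := by
      intro ds
      induction ds with
      | nil => intro u hu; exact hu
      | cons d t iht =>
        intro u hu
        rw [List.foldl_cons]
        dsimp only
        split
        · exact iht _ (ih u _ x hu)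
        · exact iht _ hu
    exact aux pvDirs _ ((PySem.Set.mem_add _ _ _).mpr (Or.inl hx))

theorem dfs_fold_supset (world : List (List String)) (N : Int) (fuel : Nat) (p : Int × Int) :
    ∀ (ds : List (Int × Int)) (u : PySem.Set (Int × Int)), ∀ x ∈ u,
      x ∈ ds.foldl (fun vis d =>
        let q := (p.1 + d.1, p.2 + d.2)
        if in_bound q.1 q.2 N && (pvCellA world q.1 q.2 == some "#") &&
           !(PySem.Set.contains vis q) then
          pvDfsA world N fuel vis q
        else vis) u := by
  intro ds
  induction ds with
  | nil => intro u x hu; exact hu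
  | cons d t iht =>
    intro u x hu
    rw [List.foldl_cons]
    dsimp only
    split
    · exact iht _ x (dfs_supset world N fuel u _ x hu)
    · exact iht _ x hu

theorem dfs_mem_self (world : List (List String)) (N : Int) (fuel : Nat)
    (vis : PySem.Set (Int × Int)) (p : Int × Int) :
    p ∈ pvDfsA world N (fuel + 1) vis p := by
  show p ∈ pvDirs.foldl _ (PySem.Set.add vis p)
  exact dfs_fold_supset world N fuel p pvDirs _ p ((PySem.Set.mem_add _ _ _).mpr (Or.inr rfl))

theorem dfs_nodup (world : List (List String)) (N : Int) :
    ∀ (fuel : Nat) (vis : PySem.Set (Int × Int)) (p : Int × Int), vis.Nodup →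
      (pvDfsA world N fuel vis p).Nodup := by
  intro fuel
  induction fuel with
  | zero => intro vis p h; exact h
  | succ fuel ih =>
    intro vis p h
    show ((pvDirs.foldl _ (PySem.Set.add vis p) : PySem.Set (Int × Int))).Nodup
    have aux : ∀ (ds : List (Int × Int)) (u : PySem.Set (Int × Int)), u.Nodup →
        (ds.foldl (fun vis d =>
          let q := (p.1 + d.1, p.2 + d.2)
          if in_bound q.1 q.2 N && (pvCellA world q.1 q.2 == some "#") &&
             !(PySem.Set.contains vis q) then
            pvDfsA world N fuel vis q
          else vis) u).Nodup := by
      intro ds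
      induction ds with
      | nil => intro u hu; exact hu
      | cons d t iht =>
        intro u hu
        rw [List.foldl_cons]
        dsimp only
        split
        · exact iht _ (ih u _ hu)
        · exact iht _ hu
    exact aux pvDirs _ (PySem.Set.nodup_add _ _ h)

theorem dfs_bounded (world : List (List String)) (N : Int) (T : Int × Int → Prop)
    (hT : ∀ x, T x → ∀ d ∈ pvDirs, pvIsNode world N (x.1 + d.1, x.2 + d.2) →
      T (x.1 + d.1, x.2 + d.2)) :
    ∀ (fuel : Nat) (vis : PySem.Set (Int × Int)) (p : Int × Int),
      (∀ x ∈ vis, T x) → T p → ∀ x ∈ pvDfsA world N fuel vis p, T x := by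
  intro fuel
  induction fuel with
  | zero => intro vis p hvis _ x hx; exact hvis x hx
  | succ fuel ih =>
    intro vis p hvis hp
    show ∀ x ∈ pvDirs.foldl _ (PySem.Set.add vis p), T x
    have aux : ∀ (ds : List (Int × Int)), (∀ d ∈ ds, d ∈ pvDirs) →
        ∀ (u : PySem.Set (Int × Int)), (∀ x ∈ u, T x) →
        ∀ x ∈ ds.foldl (fun vis d =>
          let q := (p.1 + d.1, p.2 + d.2)
          if in_bound q.1 q.2 N && (pvCellA world q.1 q.2 == some "#") &&
             !(PySem.Set.contains vis q) then
            pvDfsA world N fuel vis q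
          else vis) u, T x := by
      intro ds
      induction ds with
      | nil => intro _ u hu x hx; exact hu x hx
      | cons d t iht =>
        intro hds u hu
        rw [List.foldl_cons]
        dsimp only
        split
        · rename_i hcond
          have hq := ((pvDfsCond_iff world N u (p.1 + d.1) (p.2 + d.2)).mp hcond).1
          exact iht (fun d' hd' => hds d' (List.mem_cons.mpr (Or.inr hd')))
            _ (ih u _ hu (hT p hp d (hds d (List.mem_cons.mpr (Or.inl rfl))) hq))
        · exact iht (fun d' hd' => hds d' (List.mem_cons.mpr (Or.inr hd'))) _ hu
    refine aux pvDirs (fun d hd => hd) _ ?_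
    intro x hx
    rcases (PySem.Set.mem_add _ _ _).mp hx with hx | rfl
    · exact hvis x hx
    · exact hp

theorem dfs_closed (world : List (List String)) (N : Int) :
    ∀ (fuel : Nat) (vis : PySem.Set (Int × Int)) (p : Int × Int), vis.Nodup → p ∉ vis →
      pvIsNode world N p →
      ((pvNodesA world N).toFinset \ vis.toFinset).card < fuel →
      (∀ y, (y ∈ vis ∨ y = p) → y ∈ pvDfsA world N fuel vis p) ∧
      (∀ x ∈ pvDfsA world N fuel vis p, x ∉ vis → ∀ d ∈ pvDirs,
        pvIsNode world N (x.1 + d.1, x.2 + d.2) →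
        (x.1 + d.1, x.2 + d.2) ∈ pvDfsA world N fuel vis p) := by
  intro fuel
  induction fuel with
  | zero => intro vis p _ _ _ hcard; omega
  | succ fuel ih =>
    intro vis p hnd hpv hpn hcard
    have hu0 : (PySem.Set.add vis p).toFinset = insert p vis.toFinset := by
      rw [PySem.Set.add_of_not_mem hpv]
      ext a
      simp
    have hpmem : p ∈ (pvNodesA world N).toFinset \ vis.toFinset := by
      simp only [Finset.mem_sdiff, List.mem_toFinset]
      exact ⟨(mem_nodesA world N p).mpr hpn, hpv⟩
    have hpos : 0 < ((pvNodesA world N).toFinset \ vis.toFinset).card :=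
      Finset.card_pos.mpr ⟨p, hpmem⟩
    have hu0card : (((pvNodesA world N).toFinset \ (PySem.Set.add vis p).toFinset).card < fuel) := by
      rw [hu0, Finset.sdiff_insert, Finset.card_erase_of_mem hpmem]
      omega
    have hu0nd : (PySem.Set.add vis p).Nodup := PySem.Set.nodup_add _ _ hnd
    have aux : ∀ (ds : List (Int × Int)), (∀ d ∈ ds, d ∈ pvDirs) →
        ∀ (u : PySem.Set (Int × Int)), u.Nodup →
        ((pvNodesA world N).toFinset \ u.toFinset).card < fuel →
        (∀ x ∈ u, x ∉ vis → x ≠ p → ∀ d ∈ pvDirs,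
          pvIsNode world N (x.1 + d.1, x.2 + d.2) → (x.1 + d.1, x.2 + d.2) ∈ u) →
        (∀ y ∈ u, y ∈ ds.foldl (fun vis d =>
            let q := (p.1 + d.1, p.2 + d.2)
            if in_bound q.1 q.2 N && (pvCellA world q.1 q.2 == some "#") &&
               !(PySem.Set.contains vis q) then
              pvDfsA world N fuel vis q
            else vis) u) ∧
        (ds.foldl (fun vis d =>
            let q := (p.1 + d.1, p.2 + d.2)
            if in_bound q.1 q.2 N && (pvCellA world q.1 q.2 == some "#") &&
               !(PySem.Set.contains vis q) then
              pvDfsA world N fuel vis q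
            else vis) u).Nodup ∧
        ((pvNodesA world N).toFinset \ (ds.foldl (fun vis d =>
            let q := (p.1 + d.1, p.2 + d.2)
            if in_bound q.1 q.2 N && (pvCellA world q.1 q.2 == some "#") &&
               !(PySem.Set.contains vis q) then
              pvDfsA world N fuel vis q
            else vis) u).toFinset).card < fuel ∧
        (∀ x ∈ ds.foldl (fun vis d =>
            let q := (p.1 + d.1, p.2 + d.2)
            if in_bound q.1 q.2 N && (pvCellA world q.1 q.2 == some "#") &&
               !(PySem.Set.contains vis q) then
              pvDfsA world N fuel vis q
            else vis) u, x ∉ vis → x ≠ p → ∀ d ∈ pvDirs,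
          pvIsNode world N (x.1 + d.1, x.2 + d.2) →
          (x.1 + d.1, x.2 + d.2) ∈ ds.foldl (fun vis d =>
            let q := (p.1 + d.1, p.2 + d.2)
            if in_bound q.1 q.2 N && (pvCellA world q.1 q.2 == some "#") &&
               !(PySem.Set.contains vis q) then
              pvDfsA world N fuel vis q
            else vis) u) ∧
        (∀ d ∈ ds, pvIsNode world N (p.1 + d.1, p.2 + d.2) →
          (p.1 + d.1, p.2 + d.2) ∈ ds.foldl (fun vis d =>
            let q := (p.1 + d.1, p.2 + d.2)
            if in_bound q.1 q.2 N && (pvCellA world q.1 q.2 == some "#") &&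
               !(PySem.Set.contains vis q) then
              pvDfsA world N fuel vis q
            else vis) u) := by
      intro ds
      induction ds with
      | nil =>
        intro _ u hund hucard hucl
        exact ⟨fun y hy => hy, hund, hucard, fun x hx => hucl x hx, fun d hd => absurd hd (by simp)⟩
      | cons d t iht =>
        intro hds u hund hucard hucl
        rw [List.foldl_cons]
        dsimp only
        by_cases hcond : (in_bound (p.1 + d.1) (p.2 + d.2) N &&
            (pvCellA world (p.1 + d.1) (p.2 + d.2) == some "#") &&
            !(PySem.Set.contains u (p.1 + d.1, p.2 + d.2))) = true
        · rw [if_pos hcond]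
          obtain ⟨hqn, hqu⟩ := (pvDfsCond_iff world N u (p.1 + d.1) (p.2 + d.2)).mp hcond
          obtain ⟨hmem', hcl'⟩ := ih u (p.1 + d.1, p.2 + d.2) hund hqu hqn hucard
          have husub : ∀ x ∈ u, x ∈ pvDfsA world N fuel u (p.1 + d.1, p.2 + d.2) :=
            fun x hx => hmem' x (Or.inl hx)
          have hqin : (p.1 + d.1, p.2 + d.2) ∈ pvDfsA world N fuel u (p.1 + d.1, p.2 + d.2) :=
            hmem' _ (Or.inr rfl)
          have hnd' := dfs_nodup world N fuel u (p.1 + d.1, p.2 + d.2) hund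
          have hcard' : ((pvNodesA world N).toFinset \
              (pvDfsA world N fuel u (p.1 + d.1, p.2 + d.2)).toFinset).card < fuel :=
            lt_of_le_of_lt (pvCardMono _ _ _ husub) hucard
          have hucl' : ∀ x ∈ pvDfsA world N fuel u (p.1 + d.1, p.2 + d.2), x ∉ vis → x ≠ p →
              ∀ d' ∈ pvDirs, pvIsNode world N (x.1 + d'.1, x.2 + d'.2) →
              (x.1 + d'.1, x.2 + d'.2) ∈ pvDfsA world N fuel u (p.1 + d.1, p.2 + d.2) := by
            intro x hx hxv hxp d' hd' hnx
            by_cases hxu : x ∈ u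
            · exact husub _ (hucl x hxu hxv hxp d' hd' hnx)
            · exact hcl' x hx hxu d' hd' hnx
          obtain ⟨m1, m2, m3, m4, m5⟩ := iht (fun d' hd' => hds d' (List.mem_cons.mpr (Or.inr hd')))
            _ hnd' hcard' hucl'
          refine ⟨fun y hy => m1 y (husub y hy), m2, m3, m4, ?_⟩
          intro d' hd' hnd'
          rcases List.mem_cons.mp hd' with rfl | hd't
          · exact m1 _ hqin
          · exact m5 d' hd't hnd'
        · rw [if_neg hcond]
          obtain ⟨m1, m2, m3, m4, m5⟩ := iht (fun d' hd' => hds d' (List.mem_cons.mpr (Or.inr hd')))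
            u hund hucard hucl
          refine ⟨m1, m2, m3, m4, ?_⟩
          intro d' hd' hnq
          rcases List.mem_cons.mp hd' with rfl | hd't
          · -- the guard failed: either the neighbour is not a node (contradiction) or it is
            -- already in u
            have : (p.1 + d'.1, p.2 + d'.2) ∈ u := by
              by_contra hq
              exact hcond ((pvDfsCond_iff world N u (p.1 + d'.1) (p.2 + d'.2)).mpr ⟨hnq, hq⟩)
            exact m1 _ this
          · exact m5 d' hd't hnq
    obtain ⟨m1, m2, m3, m4, m5⟩ := aux pvDirs (fun d hd => hd) (PySem.Set.add vis p) hu0nd hu0card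
      (by
        intro x hx hxv hxp
        rcases (PySem.Set.mem_add _ _ _).mp hx with hx | rfl
        · exact absurd hx hxv
        · exact absurd rfl hxp)
    constructor
    · intro y hy
      refine m1 y ((PySem.Set.mem_add _ _ _).mpr ?_)
      rcases hy with hy | rfl
      · exact Or.inl hy
      · exact Or.inr rfl
    · intro x hx hxv d hd hnx
      by_cases hxp : x = p
      · subst hxp
        exact m5 d hd hnx
      · exact m4 x hx hxv hxp d hd hnx



-- ---------- disjoint-set (component list) lemmas ----------

theorem pvMerge_cases (comps : List (List (Int × Int))) (e : (Int × Int) × (Int × Int)) :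
    pvMerge comps e = comps ∨
    ∃ ca cb, ca ∈ comps ∧ cb ∈ comps ∧ e.1 ∈ ca ∧ e.2 ∈ cb ∧ ca ≠ cb ∧
      pvMerge comps e = ((comps.erase ca).erase cb) ++ [ca ++ cb] := by
  rcases hfa : comps.find? (fun c => decide (e.1 ∈ c)) with _ | ca
  · left; unfold pvMerge; rw [hfa]
  rcases hfb : comps.find? (fun c => decide (e.2 ∈ c)) with _ | cb
  · left; unfold pvMerge; rw [hfa, hfb]
  by_cases hab : ca = cb
  · left; unfold pvMerge; rw [hfa, hfb]; simp [hab]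
  · right
    have hpa := List.find?_some hfa
    have hpb := List.find?_some hfb
    refine ⟨ca, cb, List.mem_of_find?_eq_some hfa, List.mem_of_find?_eq_some hfb,
      of_decide_eq_true hpa, of_decide_eq_true hpb, hab, ?_⟩
    unfold pvMerge; rw [hfa, hfb]; simp [hab]

theorem pvMerge_perm (comps : List (List (Int × Int))) (e : (Int × Int) × (Int × Int))
    (ns : List (Int × Int)) (h : comps.flatten.Perm ns) : (pvMerge comps e).flatten.Perm ns := by
  rcases pvMerge_cases comps e with heq | ⟨ca, cb, hcam, hcbm, _, _, hab, heq⟩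
  · rw [heq]; exact h
  · rw [heq]
    have h1 : comps.Perm (ca :: comps.erase ca) := List.perm_cons_erase hcam
    have hcb' : cb ∈ comps.erase ca := (List.mem_erase_of_ne (fun hc => hab hc.symm)).mpr hcbm
    have h2 : (comps.erase ca).Perm (cb :: (comps.erase ca).erase cb) := List.perm_cons_erase hcb'
    have h3 : comps.Perm (ca :: cb :: (comps.erase ca).erase cb) := h1.trans (h2.cons ca)
    have e1 : (((comps.erase ca).erase cb) ++ [ca ++ cb]).flatten =
        ((comps.erase ca).erase cb).flatten ++ (ca ++ cb) := by
      simp [List.flatten_append]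
    have e2 : (ca :: cb :: (comps.erase ca).erase cb).flatten =
        (ca ++ cb) ++ ((comps.erase ca).erase cb).flatten := by
      simp [List.flatten_cons, List.append_assoc]
    have h4 : ((ca ++ cb) ++ ((comps.erase ca).erase cb).flatten).Perm ns := by
      rw [← e2]; exact h3.flatten.symm.trans h
    rw [e1]
    exact List.perm_append_comm.trans h4

theorem pvMerge_no_nil (comps : List (List (Int × Int))) (e : (Int × Int) × (Int × Int))
    (h : [] ∉ comps) : [] ∉ pvMerge comps e := by
  rcases pvMerge_cases comps e with heq | ⟨ca, cb, hcam, _, hea, _, _, heq⟩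
  · rw [heq]; exact h
  · rw [heq]
    intro hc
    rcases List.mem_append.mp hc with hc | hc
    · exact h (List.erase_subset (List.erase_subset hc))
    · rcases List.mem_singleton.mp hc with hc
      rcases List.append_eq_nil_iff.mp hc.symm with ⟨h1, _⟩
      rw [h1] at hea
      exact List.not_mem_nil hea

theorem pvMerge_mono (comps : List (List (Int × Int))) (e : (Int × Int) × (Int × Int))
    (x y : Int × Int) (h : ∃ c ∈ comps, x ∈ c ∧ y ∈ c) :
    ∃ c ∈ pvMerge comps e, x ∈ c ∧ y ∈ c := by
  rcases pvMerge_cases comps e with heq | ⟨ca, cb, hcam, hcbm, _, _, hab, heq⟩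
  · rw [heq]; exact h
  · rw [heq]
    obtain ⟨c, hc, hx, hy⟩ := h
    by_cases h1 : c = ca
    · subst h1
      exact ⟨c ++ cb, by simp, List.mem_append_left _ hx, List.mem_append_left _ hy⟩
    by_cases h2 : c = cb
    · subst h2
      exact ⟨ca ++ c, by simp, List.mem_append_right _ hx, List.mem_append_right _ hy⟩
    · exact ⟨c, List.mem_append_left _ ((List.mem_erase_of_ne h2).mpr
        ((List.mem_erase_of_ne h1).mpr hc)), hx, hy⟩

theorem pvMerge_joins (comps : List (List (Int × Int))) (e : (Int × Int) × (Int × Int))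
    (h1 : e.1 ∈ comps.flatten) (h2 : e.2 ∈ comps.flatten) :
    ∃ c ∈ pvMerge comps e, e.1 ∈ c ∧ e.2 ∈ c := by
  obtain ⟨c1, hc1, he1⟩ := List.exists_of_mem_flatten h1
  obtain ⟨c2, hc2, he2⟩ := List.exists_of_mem_flatten h2
  obtain ⟨ca, hfa⟩ : ∃ ca, comps.find? (fun c => decide (e.1 ∈ c)) = some ca := by
    rcases hh : comps.find? (fun c => decide (e.1 ∈ c)) with _ | ca
    · rw [List.find?_eq_none] at hh
      exact absurd (decide_eq_true he1) (hh c1 hc1)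
    · exact ⟨ca, rfl⟩
  obtain ⟨cb, hfb⟩ : ∃ cb, comps.find? (fun c => decide (e.2 ∈ c)) = some cb := by
    rcases hh : comps.find? (fun c => decide (e.2 ∈ c)) with _ | cb
    · rw [List.find?_eq_none] at hh
      exact absurd (decide_eq_true he2) (hh c2 hc2)
    · exact ⟨cb, rfl⟩
  have hpa := List.find?_some hfa
  have hpb := List.find?_some hfb
  have hca := of_decide_eq_true hpa
  have hcb := of_decide_eq_true hpb
  have hcam := List.mem_of_find?_eq_some hfa
  unfold pvMerge
  rw [hfa, hfb]
  dsimp only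
  by_cases hab : ca = cb
  · rw [if_pos hab]
    exact ⟨ca, hcam, hca, hab ▸ hcb⟩
  · rw [if_neg hab]
    exact ⟨ca ++ cb, by simp, List.mem_append_left _ hca, List.mem_append_right _ hcb⟩

theorem pvMerge_closed (comps : List (List (Int × Int))) (e : (Int × Int) × (Int × Int))
    (S : Int × Int → Prop) (hS : S e.1 ↔ S e.2)
    (h : ∀ c ∈ comps, ∀ x ∈ c, S x → ∀ y ∈ c, S y) :
    ∀ c ∈ pvMerge comps e, ∀ x ∈ c, S x → ∀ y ∈ c, S y := by
  rcases pvMerge_cases comps e with heq | ⟨ca, cb, hcam, hcbm, hea, heb, hab, heq⟩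
  · rw [heq]; exact h
  · rw [heq]
    intro c hc x hx hSx y hy
    rcases List.mem_append.mp hc with hc | hc
    · exact h c (List.erase_subset (List.erase_subset hc)) x hx hSx y hy
    · rcases List.mem_singleton.mp hc with rfl
      have hS1 : S e.1 := by
        rcases List.mem_append.mp hx with hx | hx
        · exact h ca hcam x hx hSx e.1 hea
        · exact hS.mpr (h cb hcbm x hx hSx e.2 heb)
      rcases List.mem_append.mp hy with hy | hy
      · exact h ca hcam e.1 hea hS1 y hy
      · exact h cb hcbm e.2 heb (hS.mp hS1) y hy

theorem foldl_merge_perm (es : List ((Int × Int) × (Int × Int))) :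
    ∀ (comps : List (List (Int × Int))) (ns : List (Int × Int)), comps.flatten.Perm ns →
    (es.foldl pvMerge comps).flatten.Perm ns := by
  induction es with
  | nil => intro comps ns h; exact h
  | cons f t ih => intro comps ns h; exact ih _ _ (pvMerge_perm comps f ns h)

theorem foldl_merge_no_nil (es : List ((Int × Int) × (Int × Int))) :
    ∀ (comps : List (List (Int × Int))), [] ∉ comps → [] ∉ es.foldl pvMerge comps := by
  induction es with
  | nil => intro comps h; exact h
  | cons f t ih => intro comps h; exact ih _ (pvMerge_no_nil comps f h)

theorem foldl_merge_mono (es : List ((Int × Int) × (Int × Int))) (x y : Int × Int) :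
    ∀ (comps : List (List (Int × Int))), (∃ c ∈ comps, x ∈ c ∧ y ∈ c) →
    ∃ c ∈ es.foldl pvMerge comps, x ∈ c ∧ y ∈ c := by
  induction es with
  | nil => intro comps h; exact h
  | cons f t ih => intro comps h; exact ih _ (pvMerge_mono comps f x y h)

theorem foldl_merge_closed (S : Int × Int → Prop) (es : List ((Int × Int) × (Int × Int)))
    (hS : ∀ e ∈ es, (S e.1 ↔ S e.2)) :
    ∀ (comps : List (List (Int × Int))), (∀ c ∈ comps, ∀ x ∈ c, S x → ∀ y ∈ c, S y) →
    ∀ c ∈ es.foldl pvMerge comps, ∀ x ∈ c, S x → ∀ y ∈ c, S y := by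
  induction es with
  | nil => intro comps h; exact h
  | cons f t ih =>
    intro comps h
    exact ih (fun e he => hS e (List.mem_cons.mpr (Or.inr he))) _
      (pvMerge_closed comps f S (hS f (List.mem_cons.mpr (Or.inl rfl))) h)

theorem foldl_merge_joins (es : List ((Int × Int) × (Int × Int))) :
    ∀ (comps : List (List (Int × Int))) (ns : List (Int × Int)), comps.flatten.Perm ns →
    (∀ e ∈ es, e.1 ∈ ns ∧ e.2 ∈ ns) →
    ∀ e ∈ es, ∃ c ∈ es.foldl pvMerge comps, e.1 ∈ c ∧ e.2 ∈ c := by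
  induction es with
  | nil => intro comps ns _ _ e he; exact absurd he (List.not_mem_nil)
  | cons f t ih =>
    intro comps ns hperm hends e he
    rcases List.mem_cons.mp he with rfl | he
    · have h1 : e.1 ∈ comps.flatten := (hperm.mem_iff).mpr (hends e (List.mem_cons.mpr (Or.inl rfl))).1
      have h2 : e.2 ∈ comps.flatten := (hperm.mem_iff).mpr (hends e (List.mem_cons.mpr (Or.inl rfl))).2
      exact foldl_merge_mono t e.1 e.2 _ (pvMerge_joins comps e h1 h2)
    · exact ih _ ns (pvMerge_perm comps f ns hperm)
        (fun e' he' => hends e' (List.mem_cons.mpr (Or.inr he'))) e he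

theorem pvCompUnique (comps : List (List (Int × Int))) (h : comps.flatten.Nodup)
    (c c' : List (Int × Int)) (hc : c ∈ comps) (hc' : c' ∈ comps) (x : Int × Int)
    (hx : x ∈ c) (hx' : x ∈ c') : c = c' := by
  rw [List.nodup_flatten] at h
  by_contra hne
  have hsym : Symmetric (List.Disjoint (α := (Int × Int))) := by
    intro a b hab x hxb hxa
    exact hab hxa hxb
  exact (List.Pairwise.forall hsym h.2 hc hc' hne) hx hx'

theorem pvFlattenSingletons (ns : List (Int × Int)) : (ns.map (fun p => [p])).flatten = ns := by
  induction ns with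
  | nil => rfl
  | cons x t ih => simp only [List.map_cons, List.flatten_cons, List.singleton_append, ih]


-- ---------- final assembly ----------

theorem pvConn_iff (world : List (List String)) (N : Int) (p0 : Int × Int)
    (rest : List (Int × Int)) (hns : pvNodesA world N = p0 :: rest) :
    ((pvDfsA world N ((pvNodesA world N).length + 1) PySem.Set.empty p0).length =
      (pvNodesA world N).length) ↔
    ((pvEdgesB world N (pvNodesA world N)).foldl pvMerge
      ((pvNodesA world N).map (fun p => [p]))).length = 1 := by
  set V := pvDfsA world N ((pvNodesA world N).length + 1) PySem.Set.empty p0 with hVdef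
  set C := (pvEdgesB world N (pvNodesA world N)).foldl pvMerge
    ((pvNodesA world N).map (fun p => [p])) with hCdef
  have hp0ns : p0 ∈ pvNodesA world N := by rw [hns]; exact List.mem_cons_self
  have hp0n : pvIsNode world N p0 := (mem_nodesA world N p0).mp hp0ns
  have hVsub : ∀ x ∈ V, x ∈ pvNodesA world N := by
    intro x hx
    exact dfs_bounded world N (· ∈ pvNodesA world N)
      (fun y _ d _ hq => (mem_nodesA world N _).mpr hq) _ _ p0
      (fun z hz => absurd hz (List.not_mem_nil)) hp0ns x hx
  have hVnd : V.Nodup := dfs_nodup world N _ _ p0 List.nodup_nil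
  have hcard0 : ((pvNodesA world N).toFinset \
      (PySem.Set.empty : PySem.Set (Int × Int)).toFinset).card <
      (pvNodesA world N).length + 1 := by
    show ((pvNodesA world N).toFinset \ ([] : List (Int × Int)).toFinset).card < _
    rw [List.toFinset_nil, Finset.sdiff_empty, List.toFinset_card_of_nodup (nodup_nodesA world N)]
    omega
  have hVclosed : ∀ x ∈ V, ∀ d ∈ pvDirs, pvIsNode world N (x.1 + d.1, x.2 + d.2) →
      (x.1 + d.1, x.2 + d.2) ∈ V := by
    intro x hx d hd hq
    exact (dfs_closed world N _ _ p0 List.nodup_nil (List.not_mem_nil) hp0n hcard0).2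
      x hx (List.not_mem_nil) d hd hq
  have hp0V : p0 ∈ V := dfs_mem_self world N _ _ p0
  have hbase : ((pvNodesA world N).map (fun p => [p])).flatten.Perm (pvNodesA world N) := by
    rw [pvFlattenSingletons]
  have hperm : C.flatten.Perm (pvNodesA world N) := foldl_merge_perm _ _ _ hbase
  have hnil : [] ∉ C := by
    refine foldl_merge_no_nil _ _ ?_
    intro hc
    rcases List.mem_map.mp hc with ⟨p, _, hp⟩
    exact List.cons_ne_nil _ _ hp
  have hflnd : C.flatten.Nodup := (hperm.nodup_iff).mpr (nodup_nodesA world N)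
  have hends : ∀ e ∈ pvEdgesB world N (pvNodesA world N),
      e.1 ∈ pvNodesA world N ∧ e.2 ∈ pvNodesA world N := by
    intro e he
    have h := (mem_edgesB world N e).mp he
    exact ⟨(mem_nodesA world N _).mpr h.1, (mem_nodesA world N _).mpr h.2.1⟩
  have hSiff : ∀ e ∈ pvEdgesB world N (pvNodesA world N), (e.1 ∈ V ↔ e.2 ∈ V) := by
    intro e he
    have hIE := (mem_edgesB world N e).mp he
    obtain ⟨⟨a1, a2⟩, b⟩ := e
    obtain ⟨h1, h2, h3 | h3⟩ := hIE <;> simp only at h1 h2 h3 <;> subst h3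
    · constructor
      · intro hm
        have := hVclosed (a1, a2) hm (0, 1) (by simp [pvDirs]) (by simpa using h2)
        simpa using this
      · intro hm
        have := hVclosed (a1, a2 + 1) hm (0, -1) (by simp [pvDirs]) (by simpa using h1)
        simpa using this
    · constructor
      · intro hm
        have := hVclosed (a1, a2) hm (1, 0) (by simp [pvDirs]) (by simpa using h2)
        simpa using this
      · intro hm
        have := hVclosed (a1 + 1, a2) hm (-1, 0) (by simp [pvDirs]) (by simpa using h1)
        simpa using this
  have hmidA : (V.length = (pvNodesA world N).length) ↔ ∀ q ∈ pvNodesA world N, q ∈ V := by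
    constructor
    · intro hlen q hq
      have hsp : V.Subperm (pvNodesA world N) :=
        List.subperm_of_subset hVnd (fun x hx => hVsub x hx)
      exact (hsp.perm_of_length_le (by omega)).symm.subset hq
    · intro hall
      exact ((List.perm_ext_iff_of_nodup hVnd (nodup_nodesA world N)).mpr
        (fun a => ⟨fun h => hVsub a h, fun h => hall a h⟩)).length_eq
  have hmidB : (C.length = 1) ↔ ∀ q ∈ pvNodesA world N, q ∈ V := by
    constructor
    · intro hlen q hq
      obtain ⟨c, hc⟩ := List.length_eq_one_iff.mp hlen
      have hclosedC : ∀ c ∈ C, ∀ x ∈ c, x ∈ V → ∀ y ∈ c, y ∈ V := by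
        refine foldl_merge_closed (· ∈ V) _ hSiff _ ?_
        intro c hcm x hx hSx y hy
        rcases List.mem_map.mp hcm with ⟨p, _, rfl⟩
        rcases List.mem_singleton.mp hx with rfl
        rcases List.mem_singleton.mp hy with rfl
        exact hSx
      have hqC : q ∈ c := by
        have hqf : q ∈ C.flatten := hperm.mem_iff.mpr hq
        rw [hc] at hqf
        simpa using hqf
      have hp0C : p0 ∈ c := by
        have hpf : p0 ∈ C.flatten := hperm.mem_iff.mpr hp0ns
        rw [hc] at hpf
        simpa using hpf
      exact hclosedC c (by rw [hc]; exact List.mem_cons_self) p0 hp0C hp0V q hqC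
    · intro hall
      have hp0fl : p0 ∈ C.flatten := hperm.mem_iff.mpr hp0ns
      obtain ⟨c0, hc0m, hp0c0⟩ := List.exists_of_mem_flatten hp0fl
      have hjoins := foldl_merge_joins (pvEdgesB world N (pvNodesA world N)) _ _ hbase hends
      have hsubc0 : ∀ x ∈ V, x ∈ c0 := by
        intro x hx
        refine dfs_bounded world N (· ∈ c0) ?_ _ _ p0
          (fun z hz => absurd hz (List.not_mem_nil)) hp0c0 x hx
        intro y hy d hd hq
        have hyfl : y ∈ C.flatten := List.mem_flatten.mpr ⟨c0, hc0m, hy⟩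
        have hyns : y ∈ pvNodesA world N := hperm.mem_iff.mp hyfl
        have hyn := (mem_nodesA world N y).mp hyns
        simp only [pvDirs, List.mem_cons, List.not_mem_nil, or_false] at hd
        rcases hd with rfl | rfl | rfl | rfl
        · have he : ((y.1 + -1, y.2 + 0), y) ∈ pvEdgesB world N (pvNodesA world N) :=
            (mem_edgesB world N _).mpr ⟨hq, hyn, Or.inr
              (pvPairEq (show y.1 = y.1 + -1 + 1 by omega) (show y.2 = y.2 + 0 by omega))⟩
          obtain ⟨c, hcm, he1, he2⟩ := hjoins _ he
          exact (pvCompUnique C hflnd c c0 hcm hc0m y he2 hy) ▸ he1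
        · have he : (y, (y.1 + 1, y.2 + 0)) ∈ pvEdgesB world N (pvNodesA world N) :=
            (mem_edgesB world N _).mpr ⟨hyn, hq, Or.inr
              (pvPairEq rfl (show y.2 + 0 = y.2 by omega))⟩
          obtain ⟨c, hcm, he1, he2⟩ := hjoins _ he
          exact (pvCompUnique C hflnd c c0 hcm hc0m y he1 hy) ▸ he2
        · have he : ((y.1 + 0, y.2 + -1), y) ∈ pvEdgesB world N (pvNodesA world N) :=
            (mem_edgesB world N _).mpr ⟨hq, hyn, Or.inl
              (pvPairEq (show y.1 = y.1 + 0 by omega) (show y.2 = y.2 + -1 + 1 by omega))⟩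
          obtain ⟨c, hcm, he1, he2⟩ := hjoins _ he
          exact (pvCompUnique C hflnd c c0 hcm hc0m y he2 hy) ▸ he1
        · have he : (y, (y.1 + 0, y.2 + 1)) ∈ pvEdgesB world N (pvNodesA world N) :=
            (mem_edgesB world N _).mpr ⟨hyn, hq, Or.inl
              (pvPairEq (show y.1 + 0 = y.1 by omega) rfl)⟩
          obtain ⟨c, hcm, he1, he2⟩ := hjoins _ he
          exact (pvCompUnique C hflnd c c0 hcm hc0m y he1 hy) ▸ he2
      have hallc0 : ∀ c ∈ C, c = c0 := by
        intro c hcm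
        have hcne : c ≠ [] := fun h => hnil (h ▸ hcm)
        obtain ⟨x, hx⟩ := List.exists_mem_of_ne_nil c hcne
        have hxfl : x ∈ C.flatten := List.mem_flatten.mpr ⟨c, hcm, hx⟩
        have hxns : x ∈ pvNodesA world N := hperm.mem_iff.mp hxfl
        have hxc0 : x ∈ c0 := hsubc0 x (hall x hxns)
        exact pvCompUnique C hflnd c c0 hcm hc0m x hx hxc0
      have hCne : C ≠ [] := fun h => (by rw [h] at hc0m; exact absurd hc0m (List.not_mem_nil))
      obtain ⟨c1, t, hC⟩ := List.exists_cons_of_ne_nil hCne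
      have hc1 : c1 = c0 := hallc0 c1 (by rw [hC]; exact List.mem_cons_self)
      cases t with
      | nil => rw [hC]; rfl
      | cons c2 t' =>
        exfalso
        have hc2 : c2 = c0 := hallc0 c2 (by rw [hC]; simp)
        have hnd2 : (c1 ++ (c2 :: t').flatten).Nodup := by
          rw [← List.flatten_cons, ← hC]
          exact hflnd
        have hdisj := (List.nodup_append.mp hnd2).2.2
        have hp0c1 : p0 ∈ c1 := by rw [hc1]; exact hp0c0
        have hp0r : p0 ∈ (c2 :: t').flatten := by
          rw [List.flatten_cons]
          exact List.mem_append_left _ (by rw [hc2]; exact hp0c0)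
        exact hdisj p0 hp0c1 p0 hp0r rfl
  exact hmidA.trans hmidB.symm

theorem pvMain (world : List (List String)) (N : Int) :
    tree_check world N = tree_check_alt world N := by
  unfold tree_check tree_check_alt
  rw [nodesB_eq_nodesA]
  dsimp only
  rw [length_edgeSetA world N]
  by_cases hE : ((pvEdgesB world N (pvNodesA world N)).length : Int) =
      ((pvNodesA world N).length : Int) - 1
  · rw [if_neg (fun hc => hc hE)]
    rcases hns : pvNodesA world N with _ | ⟨p0, rest⟩
    · exfalso
      rw [hns] at hE
      simp only [List.length_nil, Nat.cast_zero] at hE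
      omega
    · have hconn := pvConn_iff world N p0 rest hns
      rw [hns] at hconn hE
      rw [PySem.List.pyGet?_zero_cons]
      dsimp only
      rw [Bool.eq_iff_iff]
      simp only [beq_iff_eq, Bool.and_eq_true, Int.natCast_inj]
      constructor
      · intro h
        exact ⟨hconn.mp h, hE⟩
      · rintro ⟨h, _⟩
        exact hconn.mpr h
  · rw [if_pos hE]
    have h2 : (((pvEdgesB world N (pvNodesA world N)).length : Int) ==
        ((pvNodesA world N).length : Int) - 1) = false := by
      simp [hE]
    rw [h2, Bool.and_false]

-- ===== VERDICT (by name: the statement is the Claim_ definition above) =====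
theorem tree_check_spec : Claim_equal_tree_check := by
  intro world N _ _
  unfold Spec_tree_check
  exact pvMain world N
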